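-- pv_equiv track=rewrite | github.com/x06lan/mt | et5.py | check
-- ===== SOURCE A (Python) =====
-- import copy
--
-- def col(rooms,meet,max_number):
--     if meet[2]>max_number:
--         return True
--     for i in rooms:
--         if meet[0]>=i[1]and meet[1]>i[1]:
--             pass
--         elif i[0] >=meet[1]and i[1]>meet[1]:
--             pass
--         else:
--             return True
--     return False
--
-- def check(rooms,meets,max_n):
--     if len(meets)==0:
--         return  [sum([j[1]-j[0]for i in rooms for j in i])]
--     new_meets=copy.deepcopy(meets)
--     meet=new_meets.pop(0)
--     out=[]
--     for i in range(len(rooms)):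
--         room=rooms[i]
--         if not col(room,meet,max_n[i]):
--             new_rooms=copy.deepcopy(rooms)
--             new_rooms[i].append(meet)
--             out+=check(new_rooms,new_meets,max_n)
--     out+=check(rooms,new_meets,max_n)
--     return out
-- ===== SOURCE B (Python) =====
-- def _conflicts(room, meet, max_number):
--     if meet[2] > max_number:
--         return True
--     return any(
--         not (meet[0] >= iv[1] and meet[1] > iv[1])
--         and not (iv[0] >= meet[1] and iv[1] > meet[1])
--         for iv in room
--     )
--
-- def check(rooms, meets, max_n):
--     # Breadth-wise frontier of room configurations; every leaf is at the same
--     # depth, so level-order expansion yields exactly A's DFS leaf order.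
--     frontier = [rooms]
--     for meet in meets:
--         nxt = []
--         for cfg in frontier:
--             for i, room in enumerate(cfg):
--                 if not _conflicts(room, meet, max_n[i]):
--                     nxt.append(cfg[:i] + [room + [meet]] + cfg[i + 1:])
--             nxt.append(cfg)
--         frontier = nxt
--     return [sum(j[1] - j[0] for room in cfg for j in room) for cfg in frontier]
-- ===== Notes on version B (the rewrite author's own statement) =====
-- stated objective: alternative
-- what changed: Replaces A's depth-first recursion (which deepcopies the meeting list and the room configuration at every branch) with a single fold over the meetings that maintains a flat frontier of room configurations, expanded level by level; since every leaf of A's search tree sits at depth len(meets), level-order expansion yields exactly A's DFS output order.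
import Mathlib
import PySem

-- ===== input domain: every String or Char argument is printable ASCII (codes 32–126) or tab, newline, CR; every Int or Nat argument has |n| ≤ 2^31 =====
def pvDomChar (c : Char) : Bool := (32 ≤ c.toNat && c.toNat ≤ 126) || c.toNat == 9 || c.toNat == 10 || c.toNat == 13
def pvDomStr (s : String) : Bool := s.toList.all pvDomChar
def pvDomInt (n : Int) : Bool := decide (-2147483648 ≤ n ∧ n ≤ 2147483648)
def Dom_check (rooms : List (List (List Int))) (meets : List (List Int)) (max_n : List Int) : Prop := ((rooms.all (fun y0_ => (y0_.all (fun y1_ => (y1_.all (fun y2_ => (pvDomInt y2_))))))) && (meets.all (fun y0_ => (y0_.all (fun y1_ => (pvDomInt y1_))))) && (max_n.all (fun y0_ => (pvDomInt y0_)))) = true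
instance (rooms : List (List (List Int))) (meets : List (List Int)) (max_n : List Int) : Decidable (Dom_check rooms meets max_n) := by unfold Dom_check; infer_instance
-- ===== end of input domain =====

-- B replaces A's depth-first recursion (deepcopy per branch) by a single fold over the
-- meetings maintaining a frontier of room configurations; same return value, same order.

-- ===== PORT A =====
-- col's `for i in rooms` loop, step for step
def colLoopA (meet : List Int) : List (List Int) → Bool
  | [] => false
  | i :: rest =>
    if PySem.List.pyGetD meet 0 0 ≥ PySem.List.pyGetD i 1 0 ∧ PySem.List.pyGetD meet 1 0 > PySem.List.pyGetD i 1 0 then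
      colLoopA meet rest
    else if PySem.List.pyGetD i 0 0 ≥ PySem.List.pyGetD meet 1 0 ∧ PySem.List.pyGetD i 1 0 > PySem.List.pyGetD meet 1 0 then
      colLoopA meet rest
    else true

def colA (rooms : List (List Int)) (meet : List Int) (max_number : Int) : Bool :=
  if PySem.List.pyGetD meet 2 0 > max_number then true else colLoopA meet rooms

mutual
-- A's `for i in range(len(rooms)): out += …`, recursion over the index list
def checkLoop (rooms : List (List (List Int))) (meet : List Int) (new_meets : List (List Int)) (max_n : List Int) (idxs : List Int) : List Int :=
  match idxs with
  | [] => []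
  | i :: rest =>
    let room := PySem.List.pyGetD rooms i []
    (if ¬ colA room meet (PySem.List.pyGetD max_n i 0) then
       check (PySem.List.pySetD rooms i (room ++ [meet])) new_meets max_n
     else []) ++ checkLoop rooms meet new_meets max_n rest
termination_by (new_meets.length + 1, 0, idxs.length)

def check (rooms : List (List (List Int))) (meets : List (List Int)) (max_n : List Int) : List Int :=
  match meets with
  | [] => [(rooms.flatMap (fun i => i.map (fun j => PySem.List.pyGetD j 1 0 - PySem.List.pyGetD j 0 0))).sum]
  | meet :: new_meets =>
    checkLoop rooms meet new_meets max_n (PySem.List.pyRange 0 rooms.length 1)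
      ++ check rooms new_meets max_n
termination_by (meets.length, 1, 0)
end

-- ===== PORT B =====
def colB (room : List (List Int)) (meet : List Int) (max_number : Int) : Bool :=
  decide (PySem.List.pyGetD meet 2 0 > max_number) ||
  room.any (fun iv =>
    !(decide (PySem.List.pyGetD meet 0 0 ≥ PySem.List.pyGetD iv 1 0) &&
      decide (PySem.List.pyGetD meet 1 0 > PySem.List.pyGetD iv 1 0)) &&
    !(decide (PySem.List.pyGetD iv 0 0 ≥ PySem.List.pyGetD meet 1 0) &&
      decide (PySem.List.pyGetD iv 1 0 > PySem.List.pyGetD meet 1 0)))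

def check_alt (rooms : List (List (List Int))) (meets : List (List Int)) (max_n : List Int) : List Int :=
  (meets.foldl (fun frontier meet =>
      frontier.foldl (fun nxt cfg =>
        ((PySem.List.enumerate cfg 0).foldl (fun nxt p =>
            if colB p.2 meet (PySem.List.pyGetD max_n p.1 0) then nxt
            else nxt ++ [PySem.List.slice cfg none (some p.1) ++ [p.2 ++ [meet]]
                          ++ PySem.List.slice cfg (some (p.1 + 1)) none]) nxt)
        ++ [cfg]) []) [rooms]).map
    (fun cfg => cfg.foldl (fun a room =>
        room.foldl (fun a j => a + (PySem.List.pyGetD j 1 0 - PySem.List.pyGetD j 0 0)) a) 0)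

-- ===== PRECONDITION & SPEC =====
-- Pre_ excludes exactly the inputs where the Python A raises: an interval (or, once rooms
-- and meets are both nonempty, a meeting) shorter than needed, or max_n shorter than rooms.
def Pre_check (rooms : List (List (List Int))) (meets : List (List Int)) (max_n : List Int) : Prop :=
  (∀ r ∈ rooms, ∀ iv ∈ r, 2 ≤ iv.length) ∧
  (meets = [] ∨ rooms = [] ∨
    ((∀ m ∈ meets, 3 ≤ m.length) ∧ rooms.length ≤ max_n.length))
instance (rooms : List (List (List Int))) (meets : List (List Int)) (max_n : List Int) : Decidable (Pre_check rooms meets max_n) := by unfold Pre_check; infer_instance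

def pvWitness_check : List (List (List Int)) × List (List Int) × List Int :=
  ([[[0, 2]], []], [[1, 3, 0], [2, 4, 1]], [5, 5])

def Spec_check (rooms : List (List (List Int))) (meets : List (List Int)) (max_n : List Int) (out : List Int) : Prop := out = check_alt rooms meets max_n
instance (rooms : List (List (List Int))) (meets : List (List Int)) (max_n : List Int) (out : List Int) : Decidable (Spec_check rooms meets max_n out) := by unfold Spec_check; infer_instance

-- ===== CLAIM (what is proved, stated in full; the proofs are below) =====
def Claim_equal_check : Prop := ∀ (rooms : List (List (List Int))) (meets : List (List Int)) (max_n : List Int), Dom_check rooms meets max_n → Pre_check rooms meets max_n → Spec_check rooms meets max_n (check rooms meets max_n)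

-- ===== LEMMAS AND PROOFS =====

-- B's placement list for one configuration and one meeting (proof-side name for the
-- value the inner enumerate-loop of check_alt accumulates)
def placedB (max_n : List Int) (meet : List Int) (cfg : List (List (List Int))) : List (List (List (List Int))) :=
  ((PySem.List.enumerate cfg 0).filter
      (fun p => !colB p.2 meet (PySem.List.pyGetD max_n p.1 0))).map
    (fun p => PySem.List.slice cfg none (some p.1) ++ [p.2 ++ [meet]]
               ++ PySem.List.slice cfg (some (p.1 + 1)) none)

@[simp] def childrenB (max_n : List Int) (meet : List Int) (cfg : List (List (List Int))) : List (List (List (List Int))) :=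
  placedB max_n meet cfg ++ [cfg]

lemma col_eq (rooms : List (List Int)) (meet : List Int) (mx : Int) :
    colA rooms meet mx = colB rooms meet mx := by
  unfold colA colB
  by_cases h : PySem.List.pyGetD meet 2 0 > mx
  · simp [h]
  · rw [if_neg h, decide_eq_false h, Bool.false_or]
    induction rooms with
    | nil => simp [colLoopA]
    | cons i rest ih =>
      show (if PySem.List.pyGetD meet 0 0 ≥ PySem.List.pyGetD i 1 0 ∧ PySem.List.pyGetD meet 1 0 > PySem.List.pyGetD i 1 0 then colLoopA meet rest
            else if PySem.List.pyGetD i 0 0 ≥ PySem.List.pyGetD meet 1 0 ∧ PySem.List.pyGetD i 1 0 > PySem.List.pyGetD meet 1 0 then colLoopA meet rest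
            else true) = _
      rw [List.any_cons, ← Bool.decide_and, ← Bool.decide_and, ih]
      by_cases h1 : PySem.List.pyGetD meet 0 0 ≥ PySem.List.pyGetD i 1 0 ∧ PySem.List.pyGetD meet 1 0 > PySem.List.pyGetD i 1 0
      · rw [if_pos h1, decide_eq_true h1]
        simp
      · rw [if_neg h1, decide_eq_false h1]
        by_cases h2 : PySem.List.pyGetD i 0 0 ≥ PySem.List.pyGetD meet 1 0 ∧ PySem.List.pyGetD i 1 0 > PySem.List.pyGetD meet 1 0
        · rw [if_pos h2, decide_eq_true h2]
          simp
        · rw [if_neg h2, decide_eq_false h2]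
          simp

lemma foldl_skip_append {α β : Type} (c : α → Bool) (f : α → β) :
    ∀ (l : List α) (acc : List β),
      l.foldl (fun acc x => if c x then acc else acc ++ [f x]) acc
        = acc ++ (l.filter (fun x => !c x)).map f := by
  intro l
  induction l with
  | nil => simp
  | cons x xs ih =>
    intro acc
    by_cases h : c x
    · simp [List.foldl_cons, h, ih]
    · simp [List.foldl_cons, h, ih]

lemma inner_sum_eq (room : List (List Int)) :
    ∀ (a : Int),
      room.foldl (fun a j => a + (PySem.List.pyGetD j 1 0 - PySem.List.pyGetD j 0 0)) a
        = a + (room.map (fun j => PySem.List.pyGetD j 1 0 - PySem.List.pyGetD j 0 0)).sum := by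
  induction room with
  | nil => simp
  | cons j rest ih =>
    intro a
    rw [List.foldl_cons, ih, List.map_cons, List.sum_cons]
    omega

lemma sum_eq (cfg : List (List (List Int))) :
    cfg.foldl (fun a room =>
        room.foldl (fun a j => a + (PySem.List.pyGetD j 1 0 - PySem.List.pyGetD j 0 0)) a) 0
      = (cfg.flatMap (fun i => i.map (fun j => PySem.List.pyGetD j 1 0 - PySem.List.pyGetD j 0 0))).sum := by
  have gen : ∀ (cfg : List (List (List Int))) (a : Int),
      cfg.foldl (fun a room =>
          room.foldl (fun a j => a + (PySem.List.pyGetD j 1 0 - PySem.List.pyGetD j 0 0)) a) a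
        = a + (cfg.flatMap (fun i => i.map (fun j => PySem.List.pyGetD j 1 0 - PySem.List.pyGetD j 0 0))).sum := by
    intro cfg
    induction cfg with
    | nil => simp
    | cons room rest ih =>
      intro a
      rw [List.foldl_cons, inner_sum_eq, ih, List.flatMap_cons, List.sum_append]
      omega
  simpa using gen cfg 0

lemma pySetD_eq_slices {α : Type} (xs : List α) (i : Int) (v : α)
    (h0 : 0 ≤ i) (h1 : i < (xs.length : Int)) :
    PySem.List.pySetD xs i v
      = PySem.List.slice xs none (some i) ++ [v] ++ PySem.List.slice xs (some (i + 1)) none := by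
  obtain ⟨n, rfl⟩ := Int.eq_ofNat_of_zero_le h0
  have hn : n < xs.length := by exact_mod_cast h1
  have hcast : ((n : Int) + 1) = ((n + 1 : Nat) : Int) := by push_cast; ring
  rw [PySem.List.pySetD_natCast, PySem.List.slice_to_natCast, hcast,
    PySem.List.slice_from_natCast, List.set_eq_take_cons_drop _ hn]
  simp

lemma checkLoop_eq (meet : List Int) (ms : List (List Int)) (mx : List Int)
    (rooms : List (List (List Int))) :
    ∀ (idxs : List Int), (∀ i ∈ idxs, 0 ≤ i ∧ i < (rooms.length : Int)) →
      checkLoop rooms meet ms mx idxs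
        = (((idxs.map (fun j => (j, PySem.List.pyGetD rooms j ([] : List (List Int))))).filter
              (fun p => !colB p.2 meet (PySem.List.pyGetD mx p.1 0))).map
            (fun p => PySem.List.slice rooms none (some p.1) ++ [p.2 ++ [meet]]
                       ++ PySem.List.slice rooms (some (p.1 + 1)) none)).flatMap
            (fun cfg => check cfg ms mx) := by
  intro idxs
  induction idxs with
  | nil => intro _; simp [checkLoop]
  | cons i rest ih =>
    intro h
    have hi := h i (by simp)
    have hrest : ∀ j ∈ rest, 0 ≤ j ∧ j < (rooms.length : Int) :=
      fun j hj => h j (by simp [hj])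
    rw [checkLoop, col_eq, ih hrest]
    by_cases hc : colB (PySem.List.pyGetD rooms i []) meet (PySem.List.pyGetD mx i 0)
    · simp [hc]
    · simp [hc, pySetD_eq_slices rooms i _ hi.1 hi.2]

lemma check_cons (rooms : List (List (List Int))) (meet : List Int) (ms : List (List Int))
    (mx : List Int) :
    check rooms (meet :: ms) mx
      = (childrenB mx meet rooms).flatMap (fun cfg => check cfg ms mx) := by
  rw [check, checkLoop_eq meet ms mx rooms _
    (fun i hi => by
      rw [PySem.List.mem_pyRange_one] at hi
      exact hi)]
  rw [childrenB, placedB,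
    show ((rooms.length : Int)) = PySem.List.len rooms from (PySem.List.len_eq rooms).symm,
    ← PySem.List.enumerate_eq_map_pyRange]
  simp [List.flatMap_append]

lemma stepB_eq (mx : List Int) (meet : List Int) :
    ∀ (frontier acc : List (List (List (List Int)))),
      frontier.foldl (fun nxt cfg =>
          ((PySem.List.enumerate cfg 0).foldl (fun nxt p =>
              if colB p.2 meet (PySem.List.pyGetD mx p.1 0) then nxt
              else nxt ++ [PySem.List.slice cfg none (some p.1) ++ [p.2 ++ [meet]]
                            ++ PySem.List.slice cfg (some (p.1 + 1)) none]) nxt)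
          ++ [cfg]) acc
        = acc ++ frontier.flatMap (childrenB mx meet) := by
  intro frontier
  induction frontier with
  | nil => intro acc; simp
  | cons cfg rest ih =>
    intro acc
    rw [List.foldl_cons, foldl_skip_append, ih]
    simp [childrenB, placedB]

lemma main_eq (mx : List Int) :
    ∀ (meets : List (List Int)) (frontier : List (List (List (List Int)))),
      frontier.flatMap (fun cfg => check cfg meets mx)
        = (meets.foldl (fun frontier meet =>
              frontier.foldl (fun nxt cfg =>
                ((PySem.List.enumerate cfg 0).foldl (fun nxt p =>
                    if colB p.2 meet (PySem.List.pyGetD mx p.1 0) then nxt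
                    else nxt ++ [PySem.List.slice cfg none (some p.1) ++ [p.2 ++ [meet]]
                                  ++ PySem.List.slice cfg (some (p.1 + 1)) none]) nxt)
                ++ [cfg]) []) frontier).map
            (fun cfg => cfg.foldl (fun a room =>
                room.foldl (fun a j => a + (PySem.List.pyGetD j 1 0 - PySem.List.pyGetD j 0 0)) a) 0) := by
  intro meets
  induction meets with
  | nil =>
    intro frontier
    simp only [List.foldl_nil]
    induction frontier with
    | nil => simp
    | cons cfg rest ih =>
      rw [List.flatMap_cons, List.map_cons, check, sum_eq, ih]
      simp
  | cons meet ms ih =>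
    intro frontier
    rw [List.foldl_cons, ← ih]
    simp only [check_cons]
    rw [← List.flatMap_assoc]
    congr 1
    have h := stepB_eq mx meet frontier []
    simpa using h.symm

-- ===== VERDICT (by name: the statement is the Claim_ definition above) =====
theorem check_spec : Claim_equal_check := by
  intro rooms meets max_n _ _
  unfold Spec_check check_alt
  have h := main_eq max_n meets [rooms]
  simpa using h
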